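-- pv_equiv track=rewrite | github.com/AKS-RU/Tasks_Stepik_Python | Tasks/Функциональное программирование/tasks 7_1_19.py | my_range_gen
-- ===== SOURCE A (Python) =====
-- def my_range_gen(a: int, b: int = 0, step: int = 1):
--     if b == 0 and step>0:
--         start, end = b, a
--     else:
--         start, end = a, b
--     if step < 0:
--         while start > end:
--             yield start
--             start += step
--     elif step > 0:
--         while start < end:
--             yield start
--             start += step
-- ===== SOURCE B (Python) =====
-- def my_range_gen(a, b=0, step=1):
--     if b == 0 and step > 0:
--         start, end = b, a
--     else:
--         start, end = a, b
--     if step == 0: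
--         return
--     n = max(0, (end - start + step - (1 if step > 0 else -1)) // step)
--     for i in range(n):
--         yield start + i * step
-- ===== Notes on version B (the rewrite author's own statement) =====
-- stated objective: alternative
-- what changed: Replaces A's two sign-branched incremental while loops with a closed-form ceiling-division element count followed by a single indexed pass emitting start + i*step.
import Mathlib
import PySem

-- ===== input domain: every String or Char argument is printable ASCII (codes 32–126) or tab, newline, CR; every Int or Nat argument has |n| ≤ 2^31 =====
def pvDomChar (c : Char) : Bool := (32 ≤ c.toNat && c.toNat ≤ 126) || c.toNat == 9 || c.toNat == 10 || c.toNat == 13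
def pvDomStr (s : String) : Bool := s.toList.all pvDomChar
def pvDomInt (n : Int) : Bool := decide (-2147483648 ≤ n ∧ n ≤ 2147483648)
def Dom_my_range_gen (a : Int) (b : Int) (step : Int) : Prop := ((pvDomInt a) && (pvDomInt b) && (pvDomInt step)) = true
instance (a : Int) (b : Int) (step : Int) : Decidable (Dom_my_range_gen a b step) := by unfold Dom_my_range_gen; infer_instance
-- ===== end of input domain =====

-- B replaces A's two sign-branched incremental while loops with a closed-form
-- ceiling-division element count followed by one indexed pass (alternative decomposition, same cost).

-- ===== PORT A =====
-- 'while start > end: yield start; start += step'  (only entered when step < 0)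
def aLoopNeg (s e st : Int) : List Int :=
  if _h : st < 0 ∧ e < s then s :: aLoopNeg (s + st) e st else []
termination_by (s - e).toNat
decreasing_by omega

-- 'while start < end: yield start; start += step'  (only entered when step > 0)
def aLoopPos (s e st : Int) : List Int :=
  if _h : 0 < st ∧ s < e then s :: aLoopPos (s + st) e st else []
termination_by (e - s).toNat
decreasing_by omega

def my_range_gen (a : Int) (b : Int) (step : Int) : List Int :=
  let p := if b = 0 ∧ 0 < step then (b, a) else (a, b)
  if step < 0 then aLoopNeg p.1 p.2 step
  else if 0 < step then aLoopPos p.1 p.2 step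
  else []

-- ===== PORT B =====
def my_range_gen_alt (a : Int) (b : Int) (step : Int) : List Int :=
  let p := if b = 0 ∧ 0 < step then (b, a) else (a, b)
  if step = 0 then []
  else
    let n := max 0 (PySem.Int.floordiv (p.2 - p.1 + step - (if 0 < step then 1 else -1)) step)
    (PySem.List.pyRange 0 n 1).map (fun i => p.1 + i * step)

-- ===== PRECONDITION & SPEC =====
def Spec_my_range_gen (a : Int) (b : Int) (step : Int) (out : List Int) : Prop := out = my_range_gen_alt a b step
instance (a : Int) (b : Int) (step : Int) (out : List Int) : Decidable (Spec_my_range_gen a b step out) := by unfold Spec_my_range_gen; infer_instance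

-- ===== CLAIM (what is proved, stated in full; the proofs are below) =====
def Claim_equal_my_range_gen : Prop := ∀ (a : Int) (b : Int) (step : Int), Dom_my_range_gen a b step → Spec_my_range_gen a b step (my_range_gen a b step)

-- ===== LEMMAS AND PROOFS =====

-- ceiling-count arithmetic for a positive divisor
lemma count_succ (x st : Int) (h : 0 < st) (hx : 0 < x) :
    PySem.Int.floordiv (x + st - 1) st = PySem.Int.floordiv (x - 1) st + 1 := by
  have hb := PySem.Int.floordiv_eq_iff_of_pos (a := x - 1) (b := st) (q := PySem.Int.floordiv (x - 1) st) h
  have ⟨hl, hr⟩ := hb.mp rfl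
  have hb2 := PySem.Int.floordiv_eq_iff_of_pos (a := x + st - 1) (b := st)
    (q := PySem.Int.floordiv (x - 1) st + 1) h
  exact hb2.mpr ⟨by nlinarith, by nlinarith⟩

lemma count_zero (x st : Int) (h : 0 < st) (hx : x ≤ 0) :
    max 0 (PySem.Int.floordiv (x + st - 1) st) = 0 := by
  have := (PySem.Int.floordiv_lt_iff_lt_mul (a := x + st - 1) (b := st) (q := 1) h).mpr (by nlinarith)
  omega

lemma count_pos (x st : Int) (h : 0 < st) (hx : 0 < x) :
    0 < PySem.Int.floordiv (x + st - 1) st := by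
  have := (PySem.Int.le_floordiv_iff_mul_le (a := x + st - 1) (b := st) (q := 1) h).mpr (by nlinarith)
  omega

-- the positive-step while loop equals the indexed map with the ceiling count
lemma loopPos_eq (k : Nat) : ∀ s e st : Int, 0 < st → (e - s).toNat ≤ k →
    aLoopPos s e st =
      (List.range (max 0 (PySem.Int.floordiv (e - s + st - 1) st)).toNat).map
        (fun i : Nat => s + (i : Int) * st) := by
  induction k with
  | zero =>
    intro s e st hst hk
    rw [aLoopPos]
    have he : e ≤ s := by omega
    rw [count_zero (e - s) st hst (by omega)]
    simp [not_lt.mpr he]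
  | succ k ih =>
    intro s e st hst hk
    rw [aLoopPos]
    by_cases hse : s < e
    · simp only [hst, hse, and_true, dif_pos]
      rw [ih (s + st) e st hst (by omega)]
      have hsucc : PySem.Int.floordiv (e - s + st - 1) st
          = PySem.Int.floordiv (e - s - 1) st + 1 := by
        have := count_succ (e - s) st hst (by omega)
        simpa using this
      have hnext : e - (s + st) + st - 1 = e - s - 1 := by ring
      rw [hnext]
      have hpos := count_pos (e - s) st hst (by omega)
      have hq : 0 ≤ PySem.Int.floordiv (e - s - 1) st := by omega
      rw [hsucc]
      have hmax1 : max 0 (PySem.Int.floordiv (e - s - 1) st + 1)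
          = PySem.Int.floordiv (e - s - 1) st + 1 := by omega
      have hmax2 : max 0 (PySem.Int.floordiv (e - s - 1) st)
          = PySem.Int.floordiv (e - s - 1) st := by omega
      rw [hmax1, hmax2]
      obtain ⟨m, hm⟩ : ∃ m : Nat, PySem.Int.floordiv (e - s - 1) st = (m : Int) :=
        ⟨(PySem.Int.floordiv (e - s - 1) st).toNat, by omega⟩
      rw [hm]
      have : ((m : Int) + 1).toNat = m + 1 := by omega
      rw [this]
      have : ((m : Int)).toNat = m := by omega
      rw [this]
      rw [List.range_succ_eq_map]
      simp only [List.map_cons, List.map_map, Nat.cast_zero, zero_mul, add_zero]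
      congr 1
      apply List.map_congr_left
      intro i _
      simp only [Function.comp_apply, Nat.succ_eq_add_one]
      push_cast
      ring
    · simp only [hse, and_false, dif_neg, not_false_iff]
      rw [count_zero (e - s) st hst (by omega)]
      simp

-- the negative-step while loop, reduced to the positive arithmetic via floordiv_neg_neg
lemma loopNeg_eq (k : Nat) : ∀ s e st : Int, st < 0 → (s - e).toNat ≤ k →
    aLoopNeg s e st =
      (List.range (max 0 (PySem.Int.floordiv (e - s + st + 1) st)).toNat).map
        (fun i : Nat => s + (i : Int) * st) := by
  induction k with
  | zero =>
    intro s e st hst hk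
    rw [aLoopNeg]
    have he : s ≤ e := by omega
    have hdn : PySem.Int.floordiv (e - s + st + 1) st
        = PySem.Int.floordiv ((s - e) + (-st) - 1) (-st) := by
      rw [← PySem.Int.floordiv_neg_neg]
      ring_nf
    rw [hdn, count_zero (s - e) (-st) (by omega) (by omega)]
    simp [not_lt.mpr he]
  | succ k ih =>
    intro s e st hst hk
    rw [aLoopNeg]
    by_cases hse : e < s
    · simp only [hst, hse, and_true, dif_pos]
      rw [ih (s + st) e st hst (by omega)]
      have hdn : ∀ y : Int, PySem.Int.floordiv (y + st + 1) st
          = PySem.Int.floordiv ((-y) + (-st) - 1) (-st) := by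
        intro y
        rw [← PySem.Int.floordiv_neg_neg]
        ring_nf
      rw [hdn (e - s), hdn (e - (s + st))]
      have h1 : -(e - s) = s - e := by ring
      have h2 : -(e - (s + st)) = s - e + st := by ring
      rw [h1, h2]
      have hsucc : PySem.Int.floordiv ((s - e) + (-st) - 1) (-st)
          = PySem.Int.floordiv ((s - e) - 1) (-st) + 1 := count_succ (s - e) (-st) (by omega) (by omega)
      have hnext : s - e + st + -st - 1 = s - e - 1 := by ring
      rw [hnext]
      have hpos := count_pos (s - e) (-st) (by omega) (by omega)
      have hq : 0 ≤ PySem.Int.floordiv ((s - e) - 1) (-st) := by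
        rw [hsucc] at hpos; omega
      rw [hsucc]
      have hmax1 : max 0 (PySem.Int.floordiv ((s - e) - 1) (-st) + 1)
          = PySem.Int.floordiv ((s - e) - 1) (-st) + 1 := by omega
      have hmax2 : max 0 (PySem.Int.floordiv ((s - e) - 1) (-st))
          = PySem.Int.floordiv ((s - e) - 1) (-st) := by omega
      rw [hmax1, hmax2]
      obtain ⟨m, hm⟩ : ∃ m : Nat, PySem.Int.floordiv ((s - e) - 1) (-st) = (m : Int) :=
        ⟨(PySem.Int.floordiv ((s - e) - 1) (-st)).toNat, by omega⟩
      rw [hm]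
      have h3 : ((m : Int) + 1).toNat = m + 1 := by omega
      rw [h3]
      have h4 : ((m : Int)).toNat = m := by omega
      rw [h4]
      rw [List.range_succ_eq_map]
      simp only [List.map_cons, List.map_map, Nat.cast_zero, zero_mul, add_zero]
      congr 1
      apply List.map_congr_left
      intro i _
      simp only [Function.comp_apply, Nat.succ_eq_add_one]
      push_cast
      ring
    · simp only [hse, and_false, dif_neg, not_false_iff]
      have hdn : PySem.Int.floordiv (e - s + st + 1) st
          = PySem.Int.floordiv ((s - e) + (-st) - 1) (-st) := by
        rw [← PySem.Int.floordiv_neg_neg]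
        ring_nf
      rw [hdn, count_zero (s - e) (-st) (by omega) (by omega)]
      simp

-- B's pyRange pass is the same indexed map over List.range
lemma alt_map (s st n : Int) :
    (PySem.List.pyRange 0 n 1).map (fun i => s + i * st)
      = (List.range (n).toNat).map (fun i : Nat => s + (i : Int) * st) := by
  rw [PySem.List.pyRange_one]
  rw [List.map_map]
  have hz : (n - 0).toNat = n.toNat := by omega
  rw [hz]
  apply List.map_congr_left
  intro i _
  simp

-- ===== VERDICT (by name: the statement is the Claim_ definition above) =====
theorem my_range_gen_spec : Claim_equal_my_range_gen := by
  intro a b step _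
  unfold Spec_my_range_gen my_range_gen my_range_gen_alt
  rcases lt_trichotomy step 0 with hst | hst | hst
  · simp only [if_pos hst, if_neg (by omega : ¬ step = 0), if_neg (by omega : ¬ 0 < step)]
    rw [alt_map]
    exact loopNeg_eq _ _ _ _ hst le_rfl
  · simp [hst]
  · simp only [if_neg (by omega : ¬ step < 0), if_pos hst, if_neg (by omega : ¬ step = 0)]
    rw [alt_map]
    exact loopPos_eq _ _ _ _ hst le_rfl
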